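-- pv_equiv track=rewrite | github.com/PrathameshJadhav30/Accenture-PYQ-Coding-Questions | 047-Max Product Pair with Given Sum/MaxProductPair_SumTarget.py | max_product_pair_with_sum
-- ===== SOURCE A (Python) =====
-- def max_product_pair_with_sum(arr, target):
--     seen = set()
--     max_product = -1
--     result = []
--
--     for num in arr:
--         complement = target - num
--         if complement in seen:
--             product = num * complement
--             first, second = max(num, complement), min(num, complement)
--             if product > max_product:
--                 max_product = product
--                 result = [first, second]
--         seen.add(num)
--
--     return result
-- ===== SOURCE B (Python) =====
-- def max_product_pair_with_sum(arr, target):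
--     counts = {}
--     for x in arr:
--         counts[x] = counts.get(x, 0) + 1
--
--     best_product = -1
--     best = []
--     for x in counts:
--         y = target - x
--         if y in counts and (x != y or counts[x] > 1):
--             product = x * y
--             if product > best_product:
--                 best_product = product
--                 best = [x, y] if y < x else [y, x]
--     return best
-- ===== Notes on version B (the rewrite author's own statement) =====
-- stated objective: alternative
-- what changed: B builds a frequency dictionary in one pass and then scans only the distinct values, checking the complement and (for x == target-x) the multiplicity in the counter, instead of A's element-by-element scan with a growing 'seen' set that discovers pairs as the later element arrives.
import Mathlib
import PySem

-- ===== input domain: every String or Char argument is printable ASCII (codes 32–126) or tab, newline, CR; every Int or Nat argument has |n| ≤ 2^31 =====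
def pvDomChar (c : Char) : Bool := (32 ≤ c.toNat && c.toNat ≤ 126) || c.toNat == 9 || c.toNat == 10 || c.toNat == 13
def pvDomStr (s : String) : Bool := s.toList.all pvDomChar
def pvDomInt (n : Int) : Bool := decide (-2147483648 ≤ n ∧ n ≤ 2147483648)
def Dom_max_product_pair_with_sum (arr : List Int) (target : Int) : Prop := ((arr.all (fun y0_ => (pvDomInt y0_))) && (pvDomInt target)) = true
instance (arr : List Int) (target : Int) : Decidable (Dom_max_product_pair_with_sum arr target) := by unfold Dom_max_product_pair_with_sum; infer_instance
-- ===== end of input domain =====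

-- B replaces A's element-by-element scan with a growing 'seen' set by a one-pass frequency
-- dictionary followed by a scan over the distinct values (objective: alternative, same cost).

-- ===== PORT A =====
-- loop body over state (seen, max_product, result); seen.add(num) happens after the branch
def pvStepA (target : Int) (st : PySem.Set Int × Int × List Int) (num : Int) :
    PySem.Set Int × Int × List Int :=
  let complement := target - num
  let st' :=
    if PySem.Set.contains st.1 complement then
      let product := num * complement
      let first := max num complement
      let second := min num complement
      if st.2.1 < product then (product, [first, second]) else (st.2.1, st.2.2)
    else (st.2.1, st.2.2)
  (PySem.Set.add st.1 num, st')

def max_product_pair_with_sum (arr : List Int) (target : Int) : List Int :=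
  let st := arr.foldl (pvStepA target) (PySem.Set.empty, -1, [])
  st.2.2

-- ===== PORT B =====
-- loop body over state (best_product, best) for one distinct value x
def pvStepB (target : Int) (counts : PySem.Dict Int Int) (st : Int × List Int) (x : Int) :
    Int × List Int :=
  let y := target - x
  if PySem.Dict.contains counts y ∧ (x ≠ y ∨ 1 < PySem.Dict.getD counts x 0) then
    let product := x * y
    if st.1 < product then (product, if y < x then [x, y] else [y, x]) else st
  else st

def max_product_pair_with_sum_alt (arr : List Int) (target : Int) : List Int :=
  let counts : PySem.Dict Int Int :=
    arr.foldl (fun d x => d.modify x 0 (· + 1)) PySem.Dict.empty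
  let st := (PySem.Dict.keys counts).foldl (pvStepB target counts) (-1, [])
  st.2

-- ===== PRECONDITION & SPEC =====
def Spec_max_product_pair_with_sum (arr : List Int) (target : Int) (out : List Int) : Prop := out = max_product_pair_with_sum_alt arr target
instance (arr : List Int) (target : Int) (out : List Int) : Decidable (Spec_max_product_pair_with_sum arr target out) := by unfold Spec_max_product_pair_with_sum; infer_instance

-- ===== CLAIM (what is proved, stated in full; the proofs are below) =====
def Claim_equal_max_product_pair_with_sum : Prop := ∀ (arr : List Int) (target : Int), Dom_max_product_pair_with_sum arr target → Spec_max_product_pair_with_sum arr target (max_product_pair_with_sum arr target)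

-- ===== LEMMAS AND PROOFS =====

-- x is a candidate value: it pairs with target - x using two distinct positions of p
def pvCand (p : List Int) (t x : Int) : Prop :=
  x ∈ p ∧ (t - x) ∈ p ∧ (x = t - x → 2 ≤ p.count x)

-- (mp, res) is a correct running state for candidate set P
def pvGood (t : Int) (P : Int → Prop) (mp : Int) (res : List Int) : Prop :=
  ((mp = -1 ∧ res = []) ∨
    (0 ≤ mp ∧ ∃ x, P x ∧ x * (t - x) = mp ∧ res = [max x (t - x), min x (t - x)])) ∧
  (∀ x, P x → x * (t - x) ≤ mp ∨ x * (t - x) < 0)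

-- the product together with the sum determines the value pair
theorem pvPairUnique (t x y : Int) (h : x * (t - x) = y * (t - y)) : y = x ∨ y = t - x := by
  have h0 : (y - x) * (y - (t - x)) = 0 := by linear_combination h
  rcases mul_eq_zero.mp h0 with h1 | h1
  · left; omega
  · right; omega

theorem pvGood_unique (t : Int) (P : Int → Prop) (mp1 mp2 : Int) (res1 res2 : List Int)
    (h1 : pvGood t P mp1 res1) (h2 : pvGood t P mp2 res2) : res1 = res2 := by
  obtain ⟨w1, b1⟩ := h1
  obtain ⟨w2, b2⟩ := h2
  rcases w1 with ⟨hm1, hr1⟩ | ⟨hn1, x1, hp1, hv1, hr1⟩ <;>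
    rcases w2 with ⟨hm2, hr2⟩ | ⟨hn2, x2, hp2, hv2, hr2⟩
  · rw [hr1, hr2]
  · rcases b1 x2 hp2 with h | h <;> omega
  · rcases b2 x1 hp1 with h | h <;> omega
  · have e1 : x1 * (t - x1) ≤ mp2 := by rcases b2 x1 hp1 with h | h <;> omega
    have e2 : x2 * (t - x2) ≤ mp1 := by rcases b1 x2 hp2 with h | h <;> omega
    have hv : x1 * (t - x1) = x2 * (t - x2) := by omega
    rcases pvPairUnique t x1 x2 hv with h | h
    · subst h; rw [hr1, hr2]
    · subst h; rw [hr1, hr2, max_comm, min_comm]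
      congr 2 <;> omega

theorem pvCand_mono (p : List Int) (a t x : Int) (h : pvCand p t x) : pvCand (p ++ [a]) t x := by
  obtain ⟨h1, h2, h3⟩ := h
  refine ⟨List.mem_append_left _ h1, List.mem_append_left _ h2, fun he => ?_⟩
  have hc := h3 he
  have hle : p.count x ≤ (p ++ [a]).count x := by simp [List.count_append]
  omega

theorem pvCand_new (p : List Int) (a t x : Int) (h : pvCand (p ++ [a]) t x) :
    pvCand p t x ∨ (x = a ∨ x = t - a) := by
  obtain ⟨h1, h2, h3⟩ := h
  rw [List.mem_append, List.mem_singleton] at h1 h2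
  by_cases hxa : x = a
  · exact Or.inr (Or.inl hxa)
  · have h1p : x ∈ p := by tauto
    rcases h2 with h2 | h2
    · left
      refine ⟨h1p, h2, fun he => ?_⟩
      have hc := h3 he
      have hcnt : (p ++ [a]).count x = p.count x := by
        simp [List.count_append, (Ne.symm hxa : a ≠ x)]
      omega
    · exact Or.inr (Or.inr (by omega))

-- the mirrored candidate t - a gives the same product as a
theorem pvMirror (t a : Int) : (t - a) * (t - (t - a)) = a * (t - a) := by ring

-- [x, y] sorted descending is [max x y, min x y]
theorem pvPairEq (a y : Int) : (if y < a then [a, y] else [y, a]) = [max a y, min a y] := by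
  by_cases hy : y < a
  · rw [if_pos hy, max_eq_left (le_of_lt hy), min_eq_right (le_of_lt hy)]
  · rw [if_neg hy, max_eq_right (le_of_not_gt hy), min_eq_left (le_of_not_gt hy)]

-- the conditional update preserves pvGood when the candidate set grows by at most {a, t-a}
theorem pvGood_update (t a mp : Int) (res : List Int) (P Q : Int → Prop)
    (hmono : ∀ x, P x → Q x)
    (hnew : ∀ x, Q x → P x ∨ (x = a ∨ x = t - a))
    (hQa : Q a)
    (hg : pvGood t P mp res) :
    pvGood t Q (if mp < a * (t - a) then a * (t - a) else mp)
      (if mp < a * (t - a) then [max a (t - a), min a (t - a)] else res) := by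
  obtain ⟨hw, hb⟩ := hg
  have hbQ : ∀ x, Q x →
      x * (t - x) ≤ (if mp < a * (t - a) then a * (t - a) else mp) ∨ x * (t - x) < 0 := by
    intro x hQ
    rcases hnew x hQ with hP | hx
    · rcases hb x hP with h | h
      · left; split <;> omega
      · right; exact h
    · have hv : x * (t - x) = a * (t - a) := by
        rcases hx with h | h
        · subst h; rfl
        · subst h; exact pvMirror t a
      rw [hv]; left; split <;> omega
  by_cases hlt : mp < a * (t - a)
  · refine ⟨Or.inr ⟨?_, a, hQa, ?_, ?_⟩, hbQ⟩
    · rw [if_pos hlt]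
      rcases hw with ⟨hm, _⟩ | ⟨hn, _⟩ <;> omega
    · rw [if_pos hlt]
    · rw [if_pos hlt]
  · rw [if_neg hlt] at hbQ ⊢
    rw [if_neg hlt]
    refine ⟨?_, hbQ⟩
    rcases hw with ⟨hm, hr⟩ | ⟨hn, x, hp, hv, hr⟩
    · exact Or.inl ⟨hm, hr⟩
    · exact Or.inr ⟨hn, x, hmono x hp, hv, hr⟩

-- pvGood transfers along extensional equality of the candidate set
theorem pvGood_congr (t mp : Int) (res : List Int) (P Q : Int → Prop)
    (h : ∀ x, P x ↔ Q x) (hg : pvGood t P mp res) : pvGood t Q mp res := by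
  obtain ⟨hw, hb⟩ := hg
  refine ⟨?_, fun x hQ => hb x ((h x).mpr hQ)⟩
  rcases hw with h1 | ⟨hn, x, hp, hv, hr⟩
  · exact Or.inl h1
  · exact Or.inr ⟨hn, x, (h x).mp hp, hv, hr⟩

-- ---- A's loop invariant ----
theorem pvLoopA (t : Int) (l : List Int) : ∀ (p : List Int) (mp : Int) (res : List Int),
    pvGood t (pvCand p t) mp res →
    (l.foldl (pvStepA t) (PySem.Set.ofList p, mp, res)).1 = PySem.Set.ofList (p ++ l) ∧
    pvGood t (pvCand (p ++ l) t)
      (l.foldl (pvStepA t) (PySem.Set.ofList p, mp, res)).2.1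
      (l.foldl (pvStepA t) (PySem.Set.ofList p, mp, res)).2.2 := by
  induction l with
  | nil => intro p mp res hg; simpa using hg
  | cons a l ih =>
    intro p mp res hg
    have hfold : (a :: l).foldl (pvStepA t) (PySem.Set.ofList p, mp, res)
        = l.foldl (pvStepA t) (pvStepA t (PySem.Set.ofList p, mp, res) a) := rfl
    by_cases hmem : (t - a) ∈ p
    · have hc : (PySem.Set.ofList p).contains (t - a) = true :=
        (PySem.Set.contains_iff _ _).mpr ((PySem.Set.mem_ofList _ _).mpr hmem)
      have hca : pvCand (p ++ [a]) t a := by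
        refine ⟨List.mem_append_right _ (by simp), List.mem_append_left _ hmem, fun he => ?_⟩
        have ha : a ∈ p := by rw [show a = t - a from he]; exact hmem
        have h1 : 1 ≤ p.count a := List.count_pos_iff.mpr ha
        have h2 : (p ++ [a]).count a = p.count a + 1 := by
          simp [List.count_append]
        omega
      have hgu := pvGood_update t a mp res _ _ (pvCand_mono p a t)
        (pvCand_new p a t) hca hg
      by_cases hlt : mp < a * (t - a)
      · rw [if_pos hlt, if_pos hlt] at hgu
        have hstep : pvStepA t (PySem.Set.ofList p, mp, res) a
            = (PySem.Set.ofList (p ++ [a]), a * (t - a), [max a (t - a), min a (t - a)]) := by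
          simp [pvStepA, hmem, hlt, PySem.Set.ofList_append_singleton]
        rw [hfold, hstep]
        have hres := ih (p ++ [a]) _ _ hgu
        simpa [List.append_assoc] using hres
      · rw [if_neg hlt, if_neg hlt] at hgu
        have hstep : pvStepA t (PySem.Set.ofList p, mp, res) a
            = (PySem.Set.ofList (p ++ [a]), mp, res) := by
          simp [pvStepA, hmem, hlt, PySem.Set.ofList_append_singleton]
        rw [hfold, hstep]
        have hres := ih (p ++ [a]) _ _ hgu
        simpa [List.append_assoc] using hres
    · have hc : (PySem.Set.ofList p).contains (t - a) = false := by
        rw [Bool.eq_false_iff]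
        intro h
        exact hmem ((PySem.Set.mem_ofList _ _).mp ((PySem.Set.contains_iff _ _).mp h))
      have hg' : pvGood t (pvCand (p ++ [a]) t) mp res := by
        refine pvGood_congr t mp res (pvCand p t) (pvCand (p ++ [a]) t) (fun x => ?_) hg
        constructor
        · exact pvCand_mono p a t x
        · intro hQ
          rcases pvCand_new p a t x hQ with h | h
          · exact h
          · -- x = a or x = t - a; either way t - x or x would put t - a in p: impossible
            exfalso
            obtain ⟨hx1, hx2, hx3⟩ := hQ
            rw [List.mem_append, List.mem_singleton] at hx1 hx2
            rcases h with h | h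
            · subst h
              rcases hx2 with hx2 | hx2
              · exact hmem hx2
              · -- t - x = x: need count ≥ 2, so x ∈ p, contradiction with hmem
                have he : x = t - x := by omega
                have hcn := hx3 he
                have hcnt : (p ++ [x]).count x = p.count x + 1 := by
                  simp [List.count_append]
                have hxp : x ∈ p := List.count_pos_iff.mp (by omega)
                exact hmem (by rw [show t - x = x from he.symm]; exact hxp)
            · rcases hx1 with hx1 | hx1
              · exact hmem (by rw [← h]; exact hx1)
              · -- x = a and x = t - a: as above
                have he : x = t - x := by omega
                have hcn := hx3 he
                have hcnt : (p ++ [a]).count x = p.count x + 1 := by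
                  simp [List.count_append, hx1]
                have hxp : x ∈ p := List.count_pos_iff.mp (by omega)
                exact hmem (h ▸ hxp)
      have hstep : pvStepA t (PySem.Set.ofList p, mp, res) a
          = (PySem.Set.ofList (p ++ [a]), mp, res) := by
        simp [pvStepA, hmem, PySem.Set.ofList_append_singleton]
      rw [hfold, hstep]
      have hres := ih (p ++ [a]) _ _ hg'
      simpa [List.append_assoc] using hres

-- ---- B's loop invariant ----
theorem pvLoopB (t : Int) (counts : PySem.Dict Int Int) (C : Int → Prop)
    [inst : ∀ x, Decidable (C x)]
    (hC : ∀ x, ((PySem.Dict.contains counts (t - x) = true) ∧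
                (x ≠ t - x ∨ 1 < PySem.Dict.getD counts x 0)) ↔ C x)
    (l : List Int) : ∀ (q : List Int) (mp : Int) (res : List Int),
    pvGood t (fun x => x ∈ q ∧ C x) mp res →
    pvGood t (fun x => x ∈ q ++ l ∧ C x)
      (l.foldl (pvStepB t counts) (mp, res)).1
      (l.foldl (pvStepB t counts) (mp, res)).2 := by
  induction l with
  | nil => intro q mp res hg; simpa using hg
  | cons a l ih =>
    intro q mp res hg
    have hfold : (a :: l).foldl (pvStepB t counts) (mp, res)
        = l.foldl (pvStepB t counts) (pvStepB t counts (mp, res) a) := rfl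
    have hmono : ∀ x, (x ∈ q ∧ C x) → (x ∈ q ++ [a] ∧ C x) :=
      fun x ⟨hx, hc⟩ => ⟨List.mem_append_left _ hx, hc⟩
    have hnewq : ∀ x, (x ∈ q ++ [a] ∧ C x) → (x ∈ q ∧ C x) ∨ x = a := by
      intro x ⟨hx, hc⟩
      rw [List.mem_append, List.mem_singleton] at hx
      rcases hx with hx | hx
      · exact Or.inl ⟨hx, hc⟩
      · exact Or.inr hx
    by_cases hca : C a
    · have hcond := (hC a).mpr hca
      have hgu := pvGood_update t a mp res _ _ hmono
        (fun x hx => (hnewq x hx).imp id Or.inl) ⟨List.mem_append_right _ (by simp), hca⟩ hg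
      by_cases hlt : mp < a * (t - a)
      · rw [if_pos hlt, if_pos hlt] at hgu
        have hstep : pvStepB t counts (mp, res) a
            = (a * (t - a), [max a (t - a), min a (t - a)]) := by
          simp only [pvStepB]
          rw [if_pos hcond, if_pos hlt, pvPairEq]
        rw [hfold, hstep]
        have hres := ih (q ++ [a]) _ _ hgu
        simpa [List.append_assoc] using hres
      · rw [if_neg hlt, if_neg hlt] at hgu
        have hstep : pvStepB t counts (mp, res) a = (mp, res) := by
          simp only [pvStepB]
          rw [if_pos hcond, if_neg hlt]
        rw [hfold, hstep]
        have hres := ih (q ++ [a]) _ _ hgu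
        simpa [List.append_assoc] using hres
    · have hstep : pvStepB t counts (mp, res) a = (mp, res) := by
        simp only [pvStepB]
        rw [if_neg (fun h => hca ((hC a).mp h))]
      have hg' : pvGood t (fun x => x ∈ q ++ [a] ∧ C x) mp res := by
        refine pvGood_congr t mp res _ _ (fun x => ?_) hg
        constructor
        · exact hmono x
        · intro hx
          rcases hnewq x hx with h | h
          · exact h
          · exact absurd hx.2 (h ▸ hca)
      rw [hfold, hstep]
      have hres := ih (q ++ [a]) _ _ hg'
      simpa [List.append_assoc] using hres

-- initial state is good for the empty candidate set
theorem pvGood_init (t : Int) (P : Int → Prop) (h : ∀ x, ¬ P x) : pvGood t P (-1) [] :=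
  ⟨Or.inl ⟨rfl, rfl⟩, fun x hx => absurd hx (h x)⟩

-- ===== VERDICT (by name: the statement is the Claim_ definition above) =====
theorem max_product_pair_with_sum_spec : Claim_equal_max_product_pair_with_sum := by
  intro arr t _
  unfold Spec_max_product_pair_with_sum
  -- A's loop result is good for the candidate set pvCand arr t
  have hA0 : pvGood t (pvCand [] t) (-1) [] :=
    pvGood_init t _ (fun x hx => by simp [pvCand] at hx)
  have hA := (pvLoopA t arr [] (-1) [] hA0).2
  rw [List.nil_append] at hA
  -- B's loop result is good for the same candidate set
  have hcounts : arr.foldl (fun d x => d.modify x 0 (· + 1)) PySem.Dict.empty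
      = PySem.Dict.counter arr := (PySem.Dict.counter_eq_foldl arr).symm
  have hC : ∀ x : Int, ((PySem.Dict.contains (PySem.Dict.counter arr) (t - x) = true) ∧
      (x ≠ t - x ∨ 1 < PySem.Dict.getD (PySem.Dict.counter arr) x 0)) ↔
      ((t - x) ∈ arr ∧ (x ≠ t - x ∨ 2 ≤ arr.count x)) := by
    intro x
    rw [PySem.Dict.contains_counter, PySem.Dict.getD_counter]
    constructor
    · rintro ⟨h1, h2⟩
      refine ⟨by simpa using h1, ?_⟩
      rcases h2 with h | h
      · exact Or.inl h
      · right; exact_mod_cast h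
    · rintro ⟨h1, h2⟩
      refine ⟨by simpa using h1, ?_⟩
      rcases h2 with h | h
      · exact Or.inl h
      · right; exact_mod_cast h
  have hB0 : pvGood t (fun x => x ∈ ([] : List Int) ∧
      ((t - x) ∈ arr ∧ (x ≠ t - x ∨ 2 ≤ arr.count x))) (-1) [] :=
    pvGood_init t _ (fun x hx => by simp at hx)
  have hB := pvLoopB t (PySem.Dict.counter arr) _ hC (PySem.Set.ofList arr) [] (-1) [] hB0
  rw [List.nil_append] at hB
  have hB' : pvGood t (pvCand arr t)
      (((PySem.Set.ofList arr).foldl (pvStepB t (PySem.Dict.counter arr)) (-1, [])).1)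
      (((PySem.Set.ofList arr).foldl (pvStepB t (PySem.Dict.counter arr)) (-1, [])).2) := by
    refine pvGood_congr t _ _ _ _ (fun x => ?_) hB
    rw [PySem.Set.mem_ofList]
    unfold pvCand
    constructor
    · rintro ⟨h1, h2, h3⟩
      refine ⟨h1, h2, fun he => ?_⟩
      rcases h3 with h | h
      · exact absurd he h
      · exact h
    · rintro ⟨h1, h2, h3⟩
      refine ⟨h1, h2, ?_⟩
      by_cases he : x = t - x
      · exact Or.inr (h3 he)
      · exact Or.inl he
  -- both results are good states for the same candidate set, hence equal
  unfold max_product_pair_with_sum max_product_pair_with_sum_alt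
  simp only [hcounts, PySem.Dict.keys_counter]
  exact pvGood_unique t (pvCand arr t) _ _ _ _ hA hB'
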